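-- pv_equiv track=rewrite | github.com/prasadtalasila/IRCLogParser | lib/in_out/reader.py | reader_object_name
-- ===== SOURCE A (Python) =====
-- def reader_object_name(channel_name):
--
--     mapping = {'Ubuntu' : '#ubuntu-cat,#ubuntu-es,#ubuntu,#xubuntu,#ubuntu-discuss,#ubuntustudio,#ubuntu-beginners,#lubuntu,#ubuntustudio-devel,#ubuntu-irc,#ubuntu-us-nc,#ubuntu-news,#kubuntu,#ubuntu-motu,#ubuntu-ops,#ubuntu-server,#ubuntu-x,#ubuntu+1,#ubuntu-devel,#kubuntu-devel,#ubuntu-meeting,#ubuntu-translators,#edubuntu,#xubuntu-devel,#ubuntu-us-ca,#ubuntu-ke,#upstart,#ubuntu-kernel,#ubuntu-us-or,#ubuntu-community-team,#ubuntu-quality,#ubuntu-youth,#ubuntu-us-oh,#ubuntu-us-tn,#launchpad,#ubuntu-classroom,#ubuntu-us-pa,#ubuntu-gnome,#ubuntu-gnome-devel,#ubuntu-release,#ubuntu-bugs,#ubuntu-phone,#ubuntu-pl,#ubuntu-app-devel,#ubuntu-uk,#ubuntu-arb,#ubuntu-locoteams,#ubuntu-au,#ubuntu-leadership,#ubunt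u-website,#ubuntu-doc,#ubuntu-manual,#ubuntu-learning,#ubuntu-on-air,#ubuntu-nl-mwanzo,#ubuntuone,#bzr,#launchpad-meeting,#launchpad-dev,#juju-dev,#ubuntu-de,#ubuntu-ru,#ubuntu-cn,#ubuntu-mythtv,#ubuntu-ro,#ubuntu-it,#ubuntu-vn,#ubuntu-br,#ubuntu-women-project,#ubuntu-nl,#ubuntu-design,#ubuntu-ie,#ubuntu-desktop,#ubuntu-arm,#maas,#ubuntu-nz,#ubuntu-za,#ubuntu-fi,#ubuntu-mozillateam,#ubuntu-qc,#ubuntu-ca,#ubuntu-pe,#ubuntu-us-mi,#ubuntu-uy,#ubuntu-unity,#ubuntu-dk-moede,#ubuntu-dk,#ubuntu-no,#ubuntu-ph,#ubuntu-my,#ubuntu-cm,#ubuntu-rs,#ubuntu-mk,#ubuntu-tablet,#ubuntu-tv,#ubuntu-it-meeting,#ubuntu-hr,#ubuntu-tr,#ubuntu-accessibility,#ubuntu-se,#ubuntu-ir,#ubuntu-si,#ubuntu-ko,#ubuntu-installer,#ubuntu-cl,#kubuntu-se,#ubuntu-cym,#ubuntu-eg,#ubuntu-tn,#ubuntu-c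z,#ubuntu-dz,#ubuntu-us-wa,#ubuntu-ngo,#juju-gui,#ubuntu-classroom-es,#ubuntu-co,#ubuntu-us-ga,#ubuntu-jp,#launchpad-yellow,#ubuntu-papercuts,#ubuntu-us-co,#ubuntu-us-mn,#ubuntu-co-meeting,#ubuntu-ar,#ubuntu-es-locos,#ubuntu-us-fl,#ubuntu-touch,#ubuntu-us-dc,#ubuntu-us-tx,#ubuntu-sa,#ubuntu-bd,#ubuntu-artwork,#ubuntu-il,#ubuntu-fr-l10n,#ubuntu-toolchain,#ubuntu-ports,#ubuntu-zh,#ubuntu-java,#ubuntu-marketing,#ubuntu-us-sc,#ubuntu-eu,#ubuntu-tw,#ubuntu-laptop,#ubuntu-tam,#ubuntu-hk,#ubuntu-pk,#ubuntu-centroamerica,#ubuntu-charlas,#ubuntu-l10n-es,#launchpad-reviews,#ubuntu-us-ar,#ubuntu-cy,#ubuntu-lb,#ubuntu-tour,#ubuntu-for-all,#ubuntu-se-mote,#ubuntu-translators-ru,#ubuntu-pa,#ubuntu-hn,#ubuntu-us-me,#ubuntu-us-md,#ubuntu-sv,#ubuntu-tn-classroom,#ubuntu-tn-meeting', 'Slack'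 : 'slackware', 'ScummVM' : 'scummvm'}
--     reader_name = None
--     for key in mapping.keys():
--         if channel_name in mapping[key].split(','):
--             reader_name = key
--             break
--     return reader_name
-- ===== SOURCE B (Python) =====
-- _MAPPING = {'Ubuntu': '#ubuntu-cat,#ubuntu-es,#ubuntu,#xubuntu,#ubuntu-discuss,#ubuntustudio,#ubuntu-beginners,#lubuntu,#ubuntustudio-devel,#ubuntu-irc,#ubuntu-us-nc,#ubuntu-news,#kubuntu,#ubuntu-motu,#ubuntu-ops,#ubuntu-server,#ubuntu-x,#ubuntu+1,#ubuntu-devel,#kubuntu-devel,#ubuntu-meeting,#ubuntu-translators,#edubuntu,#xubuntu-devel,#ubuntu-us-ca,#ubuntu-ke,#upstart,#ubuntu-kernel,#ubuntu-us-or,#ubuntu-community-team,#ubuntu-quality,#ubuntu-youth,#ubuntu-us-oh,#ubuntu-us-tn,#launchpad,#ubuntu-classroom,#ubuntu-us-pa,#ubuntu-gnome,#ubuntu-gnome-devel,#ubuntu-release,#ubuntu-bugs,#ubuntu-phone,#ubuntu-pl,#ubuntu-app-devel,#ubuntu-uk,#ubuntu-arb,#ubuntu-locoteams,#ubuntu-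au,#ubuntu-leadership,#ubuntu-website,#ubuntu-doc,#ubuntu-manual,#ubuntu-learning,#ubuntu-on-air,#ubuntu-nl-mwanzo,#ubuntuone,#bzr,#launchpad-meeting,#launchpad-dev,#juju-dev,#ubuntu-de,#ubuntu-ru,#ubuntu-cn,#ubuntu-mythtv,#ubuntu-ro,#ubuntu-it,#ubuntu-vn,#ubuntu-br,#ubuntu-women-project,#ubuntu-nl,#ubuntu-design,#ubuntu-ie,#ubuntu-desktop,#ubuntu-arm,#maas,#ubuntu-nz,#ubuntu-za,#ubuntu-fi,#ubuntu-mozillateam,#ubuntu-qc,#ubuntu-ca,#ubuntu-pe,#ubuntu-us-mi,#ubuntu-uy,#ubuntu-unity,#ubuntu-dk-moede,#ubuntu-dk,#ubuntu-no,#ubuntu-ph,#ubuntu-my,#ubuntu-cm,#ubuntu-rs,#ubuntu-mk,#ubuntu-tablet,#ubuntu-tv,#ubuntu-it-meeting,#ubuntu-hr,#ubuntu-tr,#ubuntu-accessibility,#ubuntu-se,#ubuntu-ir,#ubuntu-si,#ubuntu-ko,#ubuntu-installer,#ubuntu-cl,#kubuntu-se,#ubuntu-cym,#ubuntu-eg,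#ubuntu-tn,#ubuntu-cz,#ubuntu-dz,#ubuntu-us-wa,#ubuntu-ngo,#juju-gui,#ubuntu-classroom-es,#ubuntu-co,#ubuntu-us-ga,#ubuntu-jp,#launchpad-yellow,#ubuntu-papercuts,#ubuntu-us-co,#ubuntu-us-mn,#ubuntu-co-meeting,#ubuntu-ar,#ubuntu-es-locos,#ubuntu-us-fl,#ubuntu-touch,#ubuntu-us-dc,#ubuntu-us-tx,#ubuntu-sa,#ubuntu-bd,#ubuntu-artwork,#ubuntu-il,#ubuntu-fr-l10n,#ubuntu-toolchain,#ubuntu-ports,#ubuntu-zh,#ubuntu-java,#ubuntu-marketing,#ubuntu-us-sc,#ubuntu-eu,#ubuntu-tw,#ubuntu-laptop,#ubuntu-tam,#ubuntu-hk,#ubuntu-pk,#ubuntu-centroamerica,#ubuntu-charlas,#ubuntu-l10n-es,#launchpad-reviews,#ubuntu-us-ar,#ubuntu-cy,#ubuntu-lb,#ubuntu-tour,#ubuntu-for-all,#ubuntu-se-mote,#ubuntu-translators-ru,#ubuntu-pa,#ubuntu-hn,#ubuntu-us-me,#ubuntu-us-md,#ubuntu-sv,#ubuntu-tn-classroom,#ubuntu-tn-meeting',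 'Slack': 'slackware', 'ScummVM': 'scummvm'}
--
-- # Reverse index built once at import: channel name -> reader key (first entry wins).
-- _REVERSE = {}
-- for _key, _channels in _MAPPING.items():
--     for _channel in _channels.split(','):
--         _REVERSE.setdefault(_channel, _key)
--
--
-- def reader_object_name(channel_name):
--     return _REVERSE.get(channel_name)
-- ===== Notes on version B (the rewrite author's own statement) =====
-- stated objective: idiomatic
-- what changed: The per-call loop over the mapping's keys with a split-and-scan membership test is replaced by a reverse index {channel: reader_key} built once at module load with setdefault; the function body becomes a single dict lookup and the for/break loop and per-call splitting disappear.
import Mathlib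
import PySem

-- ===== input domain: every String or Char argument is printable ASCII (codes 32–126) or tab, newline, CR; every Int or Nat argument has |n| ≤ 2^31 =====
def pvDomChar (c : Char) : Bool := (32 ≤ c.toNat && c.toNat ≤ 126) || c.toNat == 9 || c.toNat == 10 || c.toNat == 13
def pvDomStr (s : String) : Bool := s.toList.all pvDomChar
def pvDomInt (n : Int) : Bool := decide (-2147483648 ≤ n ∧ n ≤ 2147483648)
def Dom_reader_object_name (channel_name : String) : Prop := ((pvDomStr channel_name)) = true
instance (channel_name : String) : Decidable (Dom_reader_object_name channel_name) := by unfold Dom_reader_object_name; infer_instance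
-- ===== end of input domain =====

-- B replaces A's per-call loop over the mapping keys (splitting each value and scanning the
-- channel list) by a reverse index channel -> reader key built once; the body is one lookup.

-- the module's literal mapping (shared data of both ports)
def pvMapping : List (String × String) :=
  [("Ubuntu", "#ubuntu-cat,#ubuntu-es,#ubuntu,#xubuntu,#ubuntu-discuss,#ubuntustudio,#ubuntu-beginners,#lubuntu,#ubuntustudio-devel,#ubuntu-irc,#ubuntu-us-nc,#ubuntu-news,#kubuntu,#ubuntu-motu,#ubuntu-ops,#ubuntu-server,#ubuntu-x,#ubuntu+1,#ubuntu-devel,#kubuntu-devel,#ubuntu-meeting,#ubuntu-translators,#edubuntu,#xubuntu-devel,#ubuntu-us-ca,#ubuntu-ke,#upstart,#ubuntu-kernel,#ubuntu-us-or,#ubuntu-community-team,#ubuntu-quality,#ubuntu-youth,#ubuntu-us-oh,#ubuntu-us-tn,#launchpad,#ubuntu-classroom,#ubuntu-us-pa,#ubuntu-gnome,#ubuntu-gnome-devel,#ubuntu-release,#ubuntu-bugs,#ubuntu-phone,#ubuntu-pl,#ubuntu-app-devel,#ubuntu-uk,#ubuntu-arb,#ubuntu-locoteams,#ubuntu-a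u,#ubuntu-leadership,#ubuntu-website,#ubuntu-doc,#ubuntu-manual,#ubuntu-learning,#ubuntu-on-air,#ubuntu-nl-mwanzo,#ubuntuone,#bzr,#launchpad-meeting,#launchpad-dev,#juju-dev,#ubuntu-de,#ubuntu-ru,#ubuntu-cn,#ubuntu-mythtv,#ubuntu-ro,#ubuntu-it,#ubuntu-vn,#ubuntu-br,#ubuntu-women-project,#ubuntu-nl,#ubuntu-design,#ubuntu-ie,#ubuntu-desktop,#ubuntu-arm,#maas,#ubuntu-nz,#ubuntu-za,#ubuntu-fi,#ubuntu-mozillateam,#ubuntu-qc,#ubuntu-ca,#ubuntu-pe,#ubuntu-us-mi,#ubuntu-uy,#ubuntu-unity,#ubuntu-dk-moede,#ubuntu-dk,#ubuntu-no,#ubuntu-ph,#ubuntu-my,#ubuntu-cm,#ubuntu-rs,#ubuntu-mk,#ubuntu-tablet,#ubuntu-tv,#ubuntu-it-meeting,#ubuntu-hr,#ubuntu-tr,#ubuntu-accessibility,#ubuntu-se,#ubuntu-ir,#ubuntu-si,#ubuntu-ko,#ubuntu-installer,#ubuntu-cl,#kubuntu-se,#ubuntu-cym,#ubuntu-eg,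#ubuntu-tn,#ubuntu-cz,#ubuntu-dz,#ubuntu-us-wa,#ubuntu-ngo,#juju-gui,#ubuntu-classroom-es,#ubuntu-co,#ubuntu-us-ga,#ubuntu-jp,#launchpad-yellow,#ubuntu-papercuts,#ubuntu-us-co,#ubuntu-us-mn,#ubuntu-co-meeting,#ubuntu-ar,#ubuntu-es-locos,#ubuntu-us-fl,#ubuntu-touch,#ubuntu-us-dc,#ubuntu-us-tx,#ubuntu-sa,#ubuntu-bd,#ubuntu-artwork,#ubuntu-il,#ubuntu-fr-l10n,#ubuntu-toolchain,#ubuntu-ports,#ubuntu-zh,#ubuntu-java,#ubuntu-marketing,#ubuntu-us-sc,#ubuntu-eu,#ubuntu-tw,#ubuntu-laptop,#ubuntu-tam,#ubuntu-hk,#ubuntu-pk,#ubuntu-centroamerica,#ubuntu-charlas,#ubuntu-l10n-es,#launchpad-reviews,#ubuntu-us-ar,#ubuntu-cy,#ubuntu-lb,#ubuntu-tour,#ubuntu-for-all,#ubuntu-se-mote,#ubuntu-translators-ru,#ubuntu-pa,#ubuntu-hn,#ubuntu-us-me,#ubuntu-us-md,#ubuntu-sv,#ubuntu-tn-classroom,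#ubuntu-tn-meeting"),
   ("Slack", "slackware"),
   ("ScummVM", "scummvm")]

-- ===== PORT A =====
-- for key in mapping.keys(): if channel_name in mapping[key].split(','): reader_name = key; break
-- (split? with the nonempty literal separator "," is exact for Python's str.split(','))
def pvLoopA (channel_name : String) : List (String × String) → Option String
  | [] => none
  | (key, chans) :: rest =>
    if channel_name ∈ (PySem.Str.split? chans ",").getD [] then some key
    else pvLoopA channel_name rest

def reader_object_name (channel_name : String) : Option String :=
  pvLoopA channel_name pvMapping

-- ===== PORT B =====
-- for _key, _channels in _MAPPING.items(): for _channel in _channels.split(','): _REVERSE.setdefault(_channel, _key)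
def pvBuildReverse (m : List (String × String)) : PySem.Dict String String :=
  m.foldl
    (fun d kv =>
      ((PySem.Str.split? kv.2 ",").getD []).foldl (fun d c => d.setdefault c kv.1) d)
    PySem.Dict.empty

def pvReverse : PySem.Dict String String := pvBuildReverse pvMapping

-- return _REVERSE.get(channel_name)
def reader_object_name_alt (channel_name : String) : Option String :=
  pvReverse.get? channel_name

-- ===== PRECONDITION & SPEC =====
def Spec_reader_object_name (channel_name : String) (out : Option String) : Prop := out = reader_object_name_alt channel_name
instance (channel_name : String) (out : Option String) : Decidable (Spec_reader_object_name channel_name out) := by unfold Spec_reader_object_name; infer_instance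

-- ===== CLAIM (what is proved, stated in full; the proofs are below) =====
def Claim_equal_reader_object_name : Prop := ∀ (channel_name : String), Dom_reader_object_name channel_name → Spec_reader_object_name channel_name (reader_object_name channel_name)

-- ===== LEMMAS AND PROOFS =====

-- a setdefault-fold keeps earlier bindings: its lookup is the old dict's value, else first match in l
theorem pv_get?_foldl_setdefault {κ ν : Type} [BEq κ] [LawfulBEq κ] :
    ∀ (l : List (κ × ν)) (d : PySem.Dict κ ν) (x : κ),
      (l.foldl (fun d p => d.setdefault p.1 p.2) d).get? x =
        (d.get? x).or ((PySem.Dict.mk l).get? x) := by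
  intro l
  induction l with
  | nil => intro d x; simp [PySem.Dict.get?]
  | cons p l ih =>
    intro d x
    obtain ⟨k, v⟩ := p
    rw [List.foldl_cons, ih, PySem.Dict.get?_mk_cons]
    dsimp only
    by_cases hkx : k = x
    · subst hkx
      rw [PySem.Dict.get?_setdefault_self d k v]
      cases h : d.get? k <;> simp
    · rw [PySem.Dict.get?_setdefault_of_ne d v (Ne.symm hkx), beq_false_of_ne hkx]
      simp

-- a nested fold is the fold over the flattened pair list
theorem pv_foldl_flatMap {α β γ : Type} (f : γ → β → γ) (g : α → List β) :
    ∀ (m : List α) (init : γ),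
      m.foldl (fun acc a => (g a).foldl f acc) init = (m.flatMap g).foldl f init := by
  intro m
  induction m with
  | nil => intro init; rfl
  | cons a m ih => intro init; rw [List.foldl_cons, List.flatMap_cons, List.foldl_append, ih]

-- first-match lookup distributes over an appended pair list
theorem pv_get?_mk_append {κ ν : Type} [BEq κ] (xs ys : List (κ × ν)) (x : κ) :
    (PySem.Dict.mk (xs ++ ys)).get? x =
      ((PySem.Dict.mk xs).get? x).or ((PySem.Dict.mk ys).get? x) := by
  simp [PySem.Dict.get?, List.find?_append]
  cases List.find? (fun p => p.1 == x) xs <;> simp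

-- lookup in the reversed block of one mapping entry = membership in its channel list
theorem pv_get?_mk_map {κ ν : Type} [BEq κ] [LawfulBEq κ] (chans : List κ) (k : ν) (x : κ) :
    (PySem.Dict.mk (chans.map (fun c => (c, k)))).get? x =
      if x ∈ chans then some k else none := by
  induction chans with
  | nil => simp [PySem.Dict.get?]
  | cons c cs ih =>
    rw [List.map_cons, PySem.Dict.get?_mk_cons, ih]
    by_cases h : c = x
    · subst h; simp
    · rw [beq_false_of_ne h]
      simp [Ne.symm h]

-- A's keyed loop is first-match lookup in the flattened reverse pair list
theorem pv_loopA_eq_mk_flatMap (ch : String) :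
    ∀ (m : List (String × String)),
      pvLoopA ch m =
        (PySem.Dict.mk (m.flatMap
          (fun kv => ((PySem.Str.split? kv.2 ",").getD []).map (fun c => (c, kv.1))))).get? ch := by
  intro m
  induction m with
  | nil => simp [pvLoopA, PySem.Dict.get?]
  | cons p rest ih =>
    obtain ⟨key, chans⟩ := p
    rw [List.flatMap_cons, pv_get?_mk_append, pv_get?_mk_map, pvLoopA, ih]
    by_cases h : ch ∈ (PySem.Str.split? chans ",").getD [] <;> simp [h]

-- B's reverse index gives first-match lookup in the flattened reverse pair list
theorem pv_build_get? (m : List (String × String)) (ch : String) :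
    (pvBuildReverse m).get? ch =
      (PySem.Dict.mk (m.flatMap
        (fun kv => ((PySem.Str.split? kv.2 ",").getD []).map (fun c => (c, kv.1))))).get? ch := by
  rw [pvBuildReverse]
  have hshape :
      (fun (d : PySem.Dict String String) (kv : String × String) =>
          ((PySem.Str.split? kv.2 ",").getD []).foldl (fun d c => d.setdefault c kv.1) d) =
        (fun d kv =>
          (((PySem.Str.split? kv.2 ",").getD []).map (fun c => (c, kv.1))).foldl
            (fun d p => d.setdefault p.1 p.2) d) := by
    funext d kv
    rw [List.foldl_map]
  rw [hshape,
    pv_foldl_flatMap (fun (d : PySem.Dict String String) p => d.setdefault p.1 p.2)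
      (fun kv : String × String => ((PySem.Str.split? kv.2 ",").getD []).map (fun c => (c, kv.1))),
    pv_get?_foldl_setdefault]
  simp [PySem.Dict.empty, PySem.Dict.get?]

-- ===== VERDICT (by name: the statement is the Claim_ definition above) =====
theorem reader_object_name_spec : Claim_equal_reader_object_name := by
  intro ch _
  show reader_object_name ch = reader_object_name_alt ch
  show pvLoopA ch pvMapping = (pvBuildReverse pvMapping).get? ch
  rw [pv_loopA_eq_mk_flatMap, pv_build_get?]
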